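-- pv_equiv track=rewrite | github.com/rickdkk/advent-of-code-2021 | advent/day_10.py | find_first_closing
-- ===== SOURCE A (Python) =====
-- from typing import Optional
--
-- def find_first_closing(syntax: str) -> Optional[int]:
--     first = float("inf")
--     for closing in [")", "]", "}", ">"]:
--         if closing in syntax:
--             idx = syntax.find(closing)
--             if idx < first:
--                 first = idx
--     return None if first == float("inf") else first
-- ===== SOURCE B (Python) =====
-- def find_first_closing(syntax: str):
--     closings = frozenset(")]}>")
--     for i, ch in enumerate(syntax):
--         if ch in closings:
--             return i
--     return None
-- ===== Notes on version B (the rewrite author's own statement) =====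
-- stated objective: simpler
-- what changed: Replaces four per-bracket scans (an 'in' check plus str.find per closing char, tracking a running minimum) with one left-to-right pass that returns the index of the first closing bracket encountered.
import Mathlib
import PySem

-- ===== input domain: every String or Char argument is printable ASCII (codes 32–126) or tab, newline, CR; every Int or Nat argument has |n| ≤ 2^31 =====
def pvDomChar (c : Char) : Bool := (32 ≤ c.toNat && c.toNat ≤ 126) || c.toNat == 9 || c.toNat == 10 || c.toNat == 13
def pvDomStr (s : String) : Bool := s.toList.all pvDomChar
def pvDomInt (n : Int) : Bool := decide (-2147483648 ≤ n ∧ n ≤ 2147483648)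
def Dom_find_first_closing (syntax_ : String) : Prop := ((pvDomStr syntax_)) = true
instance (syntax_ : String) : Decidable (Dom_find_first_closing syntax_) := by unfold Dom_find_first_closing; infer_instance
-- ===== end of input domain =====

-- B replaces A's four per-bracket scans (an `in` check + str.find per closing char, keeping a
-- running minimum) with one left-to-right pass returning the first closing bracket's index (simpler).

-- ===== PORT A =====
-- `first = float("inf")` is modelled as `none` (updated to `some idx` exactly when A assigns an int);
-- `idx < first` with first = inf is always true, hence the `none` branch always updates.
def find_first_closing (syntax_ : String) : Option Int :=
  let first : Option Int :=
    [")", "]", "}", ">"].foldl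
      (fun first closing =>
        if PySem.Str.isIn closing syntax_ then
          let idx := PySem.Str.find syntax_ closing
          match first with
          | none => some idx
          | some f => if idx < f then some idx else some f
        else first) none
  first

-- ===== PORT B =====
def pvClosings : List Char := [')', ']', '}', '>']

def pvScan : List Char → Int → Option Int
  | [], _ => none
  | c :: rest, i => if pvClosings.contains c then some i else pvScan rest (i + 1)

def find_first_closing_alt (syntax_ : String) : Option Int :=
  pvScan syntax_.toList 0

-- ===== PRECONDITION & SPEC =====
def Spec_find_first_closing (syntax_ : String) (out : Option Int) : Prop := out = find_first_closing_alt syntax_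
instance (syntax_ : String) (out : Option Int) : Decidable (Spec_find_first_closing syntax_ out) := by unfold Spec_find_first_closing; infer_instance

-- ===== CLAIM (what is proved, stated in full; the proofs are below) =====
def Claim_equal_find_first_closing : Prop := ∀ (syntax_ : String), Dom_find_first_closing syntax_ → Spec_find_first_closing syntax_ (find_first_closing syntax_)

-- ===== LEMMAS AND PROOFS =====

def pvIsClosing (c : Char) : Bool := pvClosings.contains c

-- optional minimum on Option (none = +infinity), the shape of A's running `first`
def ominN : Option Nat → Option Nat → Option Nat
  | none, y => y
  | x, none => x
  | some a, some b => some (min a b)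

def ominI : Option Int → Option Int → Option Int
  | none, y => y
  | x, none => x
  | some a, some b => some (min a b)

lemma ominN_zero_left (y : Option Nat) : ominN (some 0) y = some 0 := by
  cases y <;> simp [ominN]

lemma ominN_zero_right (x : Option Nat) : ominN x (some 0) = some 0 := by
  cases x <;> simp [ominN]

lemma ominN_map_succ (x y : Option Nat) :
    ominN (x.map (· + 1)) (y.map (· + 1)) = (ominN x y).map (· + 1) := by
  cases x <;> cases y <;> simp [ominN, Nat.succ_min_succ]

lemma ominI_map_cast (x y : Option Nat) :
    ominI (x.map (fun n => (n : Int))) (y.map (fun n => (n : Int))) =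
      (ominN x y).map (fun n => (n : Int)) := by
  cases x <;> cases y <;> simp [ominI, ominN]

-- Python's s.find for a single character, characterised by List.findIdx?
lemma find_singleton (cs : List Char) (c : Char) :
    PySem.Chars.find cs [c] =
      (match cs.findIdx? (· == c) with | some n => (n : Int) | none => -1) := by
  by_cases h : c ∈ cs
  · have h0 : 0 ≤ PySem.Chars.find cs [c] :=
      (PySem.Chars.find_nonneg_iff cs [c]).mpr ((List.singleton_infix_iff c cs).mpr h)
    obtain ⟨hpre, hmin⟩ := PySem.Chars.find_spec h0
    have hk : cs.findIdx? (· == c) = some (PySem.Chars.find cs [c]).toNat := by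
      rw [List.findIdx?_eq_some_iff_getElem]
      have hsing : ∀ (l : List Char), [c] <+: l ↔ l.head? = some c := by
        intro l; cases l <;> simp [List.prefix_cons_iff, eq_comm]
      rw [hsing, List.head?_drop] at hpre
      have hlt : (PySem.Chars.find cs [c]).toNat < cs.length := by
        rcases List.getElem?_eq_some_iff.mp hpre with ⟨hl, _⟩; exact hl
      refine ⟨hlt, ?_, ?_⟩
      · have := List.getElem?_eq_some_iff.mp hpre
        simp [this.2]
      · intro j hj hpj
        apply hmin j hj
        rw [hsing, List.head?_drop]
        simp at hpj
        rw [List.getElem?_eq_some_iff]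
        exact ⟨by omega, hpj⟩
    rw [hk]
    simp [Int.toNat_of_nonneg h0]
  · have : cs.findIdx? (· == c) = none := by
      rw [List.findIdx?_eq_none_iff]
      intro x hx; simp; rintro rfl; exact h hx
    rw [this, (PySem.Chars.find_eq_neg_one_iff cs [c]).mpr]
    intro hinf; exact h ((List.singleton_infix_iff c cs).mp hinf)

-- one iteration of A's loop, for a single-character `closing`
lemma stepEq (first : Option Int) (c : Char) (cs : List Char) :
    (if PySem.Chars.isIn [c] cs then
       let idx := PySem.Chars.find cs [c]
       match first with
       | none => some idx
       | some f => if idx < f then some idx else some f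
     else first)
      = ominI first ((cs.findIdx? (· == c)).map (fun n => (n : Int))) := by
  by_cases h : c ∈ cs
  · have hin : PySem.Chars.isIn [c] cs = true :=
      (PySem.Chars.isIn_iff_infix [c] cs).mpr ((List.singleton_infix_iff c cs).mpr h)
    rcases hk : cs.findIdx? (· == c) with _ | k
    · exact absurd (List.findIdx?_eq_none_iff.mp hk c h) (by simp)
    · rw [hin, find_singleton, hk]
      cases first with
      | none => simp [ominI]
      | some f =>
          simp only [ominI]
          by_cases hlt : (k : Int) < f <;> simp [hlt] <;> omega
  · have hin : PySem.Chars.isIn [c] cs = false := by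
      rw [PySem.Chars.isIn_eq_false_iff]
      intro hinf; exact h ((List.singleton_infix_iff c cs).mp hinf)
    have hnone : cs.findIdx? (· == c) = none := by
      rw [List.findIdx?_eq_none_iff]
      intro x hx; simp; rintro rfl; exact h hx
    rw [hin, hnone]
    cases first <;> simp [ominI]

-- the first iteration of A's loop (state `none`, match already reduced)
lemma step0Eq (c : Char) (cs : List Char) :
    (if PySem.Chars.isIn [c] cs then some (PySem.Chars.find cs [c]) else none)
      = (cs.findIdx? (· == c)).map (fun n => (n : Int)) := by
  have := stepEq none c cs
  simpa [ominI] using this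

-- the minimum of the four per-character first indices is the first index of any closing char
lemma min4N (cs : List Char) :
    ominN (ominN (ominN (cs.findIdx? (· == ')')) (cs.findIdx? (· == ']')))
        (cs.findIdx? (· == '}'))) (cs.findIdx? (· == '>'))
      = cs.findIdx? pvIsClosing := by
  induction cs with
  | nil => rfl
  | cons a cs ih =>
      simp only [List.findIdx?_cons]
      by_cases h1 : a = ')'
      · simp [h1, pvIsClosing, pvClosings, ominN_zero_left]
      by_cases h2 : a = ']'
      · simp [h2, pvIsClosing, pvClosings, ominN_zero_left, ominN_zero_right]
      by_cases h3 : a = '}'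
      · simp [h3, pvIsClosing, pvClosings, ominN_zero_left, ominN_zero_right]
      by_cases h4 : a = '>'
      · simp [h4, pvIsClosing, pvClosings, ominN_zero_right]
      · have h0 : pvIsClosing a = false := by simp [pvIsClosing, pvClosings, h1, h2, h3, h4]
        have e1 : (a == ')') = false := by simp [h1]
        have e2 : (a == ']') = false := by simp [h2]
        have e3 : (a == '}') = false := by simp [h3]
        have e4 : (a == '>') = false := by simp [h4]
        simp only [h0, e1, e2, e3, e4, Bool.false_eq_true, if_false]
        rw [ominN_map_succ, ominN_map_succ, ominN_map_succ, ih]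

-- B's scan computes the first index of any closing char, offset by the accumulator
lemma pvScan_eq (cs : List Char) (i : Int) :
    pvScan cs i = (cs.findIdx? pvIsClosing).map (fun n => i + n) := by
  induction cs generalizing i with
  | nil => rfl
  | cons a cs ih =>
      rw [pvScan, List.findIdx?_cons]
      by_cases h : pvIsClosing a = true
      · have hm : a ∈ pvClosings := by simpa [pvIsClosing] using h
        simp [h, hm]
      · have hm : a ∉ pvClosings := by simpa [pvIsClosing] using h
        simp only [h, Bool.false_eq_true, if_false, ih]
        cases cs.findIdx? pvIsClosing with
        | none => simp [hm]
        | some n => simp [hm]; omega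

-- ===== VERDICT (by name: the statement is the Claim_ definition above) =====
theorem find_first_closing_spec : Claim_equal_find_first_closing := by
  intro s _
  show find_first_closing s = find_first_closing_alt s
  unfold find_first_closing find_first_closing_alt
  simp only [List.foldl_cons, List.foldl_nil, PySem.Str.isIn_eq, PySem.Str.find_eq]
  rw [show (")" : String).toList = [')'] from rfl,
      show ("]" : String).toList = [']'] from rfl,
      show ("}" : String).toList = ['}'] from rfl,
      show (">" : String).toList = ['>'] from rfl]
  rw [stepEq, stepEq, stepEq, step0Eq]
  rw [ominI_map_cast, ominI_map_cast, ominI_map_cast, min4N, pvScan_eq]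
  cases s.toList.findIdx? pvIsClosing <;> simp
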